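-- pv_equiv track=rewrite | github.com/TianXue2002/DShor | Qint/src/toolkit.py | remove_bits_from_int
-- ===== SOURCE A (Python) =====
-- def remove_bits_from_int(n: int, remove_indices) -> int:
--     """Return integer with bits at given LSB indices removed."""
--     remove_indices = set(remove_indices)
--     result = 0
--     pos = 0  # position in the new number
--
--     for i in range(n.bit_length()):
--         if i not in remove_indices:
--             bit = (n >> i) & 1
--             result |= bit << pos
--             pos += 1
--     return result
-- ===== SOURCE B (Python) =====
-- def remove_bits_from_int(n: int, remove_indices) -> int:
--     """Return integer with bits at given LSB indices removed."""
--     L = n.bit_length()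
--     m = n & ((1 << L) - 1)
--     for j in sorted({i for i in remove_indices if 0 <= i < L}, reverse=True):
--         m = ((m >> (j + 1)) << j) | (m & ((1 << j) - 1))
--     return m
-- ===== Notes on version B (the rewrite author's own statement) =====
-- stated objective: alternative
-- what changed: B iterates over the (distinct, clipped, descending-sorted) removal indices and splices each bit out of the masked number with one whole-word shift/mask step m = ((m >> (j+1)) << j) | (m & ((1 << j) - 1)), instead of A's per-position scan over all bit positions with a set-membership test and an output position counter.
import Mathlib
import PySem

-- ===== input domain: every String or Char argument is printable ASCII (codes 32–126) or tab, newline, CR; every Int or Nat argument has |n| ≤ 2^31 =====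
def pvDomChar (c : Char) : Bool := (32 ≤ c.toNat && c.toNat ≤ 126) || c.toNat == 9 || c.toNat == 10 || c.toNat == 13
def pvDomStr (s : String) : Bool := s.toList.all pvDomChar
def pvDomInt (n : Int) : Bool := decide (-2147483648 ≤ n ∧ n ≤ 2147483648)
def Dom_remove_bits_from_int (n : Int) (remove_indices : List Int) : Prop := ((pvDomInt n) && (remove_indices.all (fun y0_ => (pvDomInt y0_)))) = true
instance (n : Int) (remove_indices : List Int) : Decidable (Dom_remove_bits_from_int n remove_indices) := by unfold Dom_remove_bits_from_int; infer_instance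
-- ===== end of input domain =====

-- B masks n to its bit_length and then, for each distinct removal index in DESCENDING order,
-- splices the bit out with one shift/mask step m = ((m >> (j+1)) << j) | (m & ((1 << j) - 1)),
-- instead of A's per-position scan over all bits; objective: alternative (iterates over the
-- removal indices, not over the bit positions).


-- ===== PORT A =====
-- loop body of A: if i not in set(remove_indices): result |= ((n >> i) & 1) << pos; pos += 1
-- (pos is a nonnegative counter started at 0 and only incremented, carried as Nat; i from range is ≥ 0, so i.toNat is exact)
def pvStepA (n : Int) (remove_indices : List Int) (st : Int × Nat) (i : Int) : Int × Nat :=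
  if i ∉ PySem.Set.ofList remove_indices then
    let bit := PySem.Int.band (n >>> i.toNat) 1
    (PySem.Int.bor st.1 (bit <<< st.2), st.2 + 1)
  else st

-- for i in range(n.bit_length()): <loop body above>, starting from result = 0, pos = 0; return result
def remove_bits_from_int (n : Int) (remove_indices : List Int) : Int :=
  ((PySem.List.pyRange 0 (PySem.Int.bitLength n : Int) 1).foldl
    (pvStepA n remove_indices) ((0 : Int), (0 : Nat))).1

-- ===== PORT B =====
-- loop body of B: m = ((m >> (j + 1)) << j) | (m & ((1 << j) - 1))
-- (every j produced by B's clipped set comprehension satisfies 0 ≤ j, so .toNat on the shift counts is exact)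
def pvDelBit (m : Int) (j : Int) : Int :=
  PySem.Int.bor ((m >>> (j + 1).toNat) <<< j.toNat) (PySem.Int.band m ((1 <<< j.toNat) - 1))

-- L = n.bit_length(); m = n & ((1 << L) - 1); for j in sorted({i for i in remove_indices if 0 <= i < L}, reverse=True): …
def remove_bits_from_int_alt (n : Int) (remove_indices : List Int) : Int :=
  let L := PySem.Int.bitLength n
  let m := PySem.Int.band n ((1 <<< L) - 1)
  let js := PySem.List.sorted
    (PySem.Set.ofList (remove_indices.filter (fun i => decide (0 ≤ i ∧ i < (L : Int)))))
    (fun x => x) true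
  js.foldl pvDelBit m

-- ===== PRECONDITION & SPEC =====
def Spec_remove_bits_from_int (n : Int) (remove_indices : List Int) (out : Int) : Prop := out = remove_bits_from_int_alt n remove_indices
instance (n : Int) (remove_indices : List Int) (out : Int) : Decidable (Spec_remove_bits_from_int n remove_indices out) := by unfold Spec_remove_bits_from_int; infer_instance

-- ===== CLAIM (what is proved, stated in full; the proofs are below) =====
def Claim_equal_remove_bits_from_int : Prop := ∀ (n : Int) (remove_indices : List Int), Dom_remove_bits_from_int n remove_indices → Spec_remove_bits_from_int n remove_indices (remove_bits_from_int n remove_indices)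

-- ===== LEMMAS AND PROOFS =====

-- the digit of n at LSB position i (as A computes it)
def pvBitAt (n : Int) (i : Nat) : Int := PySem.Int.mod (PySem.Int.floordiv n (2 ^ i)) 2

-- the list of kept digits among positions 0..k-1, low position first (A's view)
def pvKept (n : Int) (remove_indices : List Int) (k : Nat) : List Int :=
  ((List.range k).filter
    (fun (i : Nat) => !(decide (((i : Int)) ∈ PySem.Set.ofList remove_indices)))).map (pvBitAt n)

-- value of a low-first digit list
def pvHorner (l : List Int) : Int := l.foldr (fun b acc => b + 2 * acc) 0

-- the k low binary digits of m, low first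
def pvDigits (m : Int) : Nat → List Int
  | 0 => []
  | k + 1 => (m % 2) :: pvDigits (m / 2) k

-- arithmetic meaning of one splice step: drop digit j
def pvDel (j : Nat) (m : Int) : Int := (m / 2 ^ (j + 1)) * 2 ^ j + m % 2 ^ j

-- the digits of l kept at (Int-valued) positions i, i+1, … not listed in js
def pvKeep (i : Int) (l : List Int) (js : List Int) : List Int :=
  match l with
  | [] => []
  | b :: t => if i ∈ js then pvKeep (i + 1) t js else b :: pvKeep (i + 1) t js

theorem pvShiftRight_floordiv (n : Int) (k : Nat) :
    n >>> k = PySem.Int.floordiv n (2 ^ k) := by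
  rw [Int.shiftRight_eq_div_pow, PySem.Int.floordiv_eq_ediv_of_pos (by positivity)]
  push_cast
  rfl

theorem pvBitAt_mem (n : Int) (i : Nat) : pvBitAt n i = 0 ∨ pvBitAt n i = 1 := by
  unfold pvBitAt
  rw [PySem.Int.mod_eq_emod_of_pos (by norm_num)]
  omega

theorem pvHorner_append (l : List Int) (b : Int) :
    pvHorner (l ++ [b]) = pvHorner l + b * 2 ^ l.length := by
  induction l with
  | nil => simp [pvHorner]
  | cons x xs ih =>
    simp only [pvHorner, List.foldr, List.cons_append, List.length_cons] at *
    rw [ih]; ring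

theorem pvHorner_bounds (l : List Int) (h : ∀ b ∈ l, b = 0 ∨ b = 1) :
    0 ≤ pvHorner l ∧ pvHorner l < 2 ^ l.length := by
  induction l with
  | nil => simp [pvHorner]
  | cons x xs ih =>
    have hx := h x (by simp)
    obtain ⟨h0, h1⟩ := ih (fun b hb => h b (by simp [hb]))
    have hp : (2 : Int) ^ (xs.length + 1) = 2 ^ xs.length * 2 := pow_succ 2 xs.length
    simp only [pvHorner, List.foldr, List.length_cons] at *
    rcases hx with hx | hx <;> subst hx <;> omega

-- bit decomposition of a * 2^j + b (b below the split)
theorem pvTestBit_mul_pow_add (a b j k : Nat) (h : b < 2 ^ j) :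
    (a * 2 ^ j + b).testBit k = if k < j then b.testBit k else a.testBit (k - j) := by
  by_cases hk : k < j
  · rw [if_pos hk, Nat.testBit_eq_decide_div_mod_eq, Nat.testBit_eq_decide_div_mod_eq]
    have h1 : (a * 2 ^ j + b) / 2 ^ k = b / 2 ^ k + a * 2 ^ (j - k) := by
      have e0 : (2 : Nat) ^ j = 2 ^ (j - k) * 2 ^ k := by
        rw [← pow_add]; congr 1; omega
      have e1 : a * 2 ^ j + b = b + (a * 2 ^ (j - k)) * 2 ^ k := by
        rw [e0]; ring
      rw [e1, Nat.add_mul_div_right _ _ (Nat.pow_pos (by norm_num))]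
    have h2 : a * 2 ^ (j - k) = (a * 2 ^ (j - k - 1)) * 2 := by
      have e0 : (2 : Nat) ^ (j - k) = 2 ^ (j - k - 1) * 2 := by
        rw [← pow_succ]; congr 1; omega
      rw [e0, ← mul_assoc]
    rw [h1, h2, Nat.add_mul_mod_self_right]
  · rw [if_neg hk, Nat.testBit_eq_decide_div_mod_eq, Nat.testBit_eq_decide_div_mod_eq]
    have h1 : (a * 2 ^ j + b) / 2 ^ k = a / 2 ^ (k - j) := by
      have e1 : (2 : Nat) ^ k = 2 ^ j * 2 ^ (k - j) := by
        rw [← pow_add]; congr 1; omega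
      rw [e1, ← Nat.div_div_eq_div_mul]
      have e2 : (a * 2 ^ j + b) / 2 ^ j = a := by
        rw [add_comm, Nat.add_mul_div_right _ _ (Nat.pow_pos (by norm_num)),
            Nat.div_eq_of_lt h]
        omega
      rw [e2]
    rw [h1]

-- ||| of a high part and a low part below the split is +
theorem pvLorAdd (a b j : Nat) (h : b < 2 ^ j) : (a * 2 ^ j) ||| b = a * 2 ^ j + b := by
  apply Nat.eq_of_testBit_eq
  intro k
  rw [Nat.testBit_lor, pvTestBit_mul_pow_add a b j k h]
  have hsh : (a * 2 ^ j).testBit k = (decide (k ≥ j) && a.testBit (k - j)) := by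
    rw [← Nat.shiftLeft_eq, Nat.testBit_shiftLeft]
  by_cases hk : k < j
  · rw [if_pos hk, hsh]
    have : decide (k ≥ j) = false := by simp; omega
    rw [this, Bool.false_and, Bool.false_or]
  · rw [if_neg hk, hsh]
    have h1 : decide (k ≥ j) = true := by simp; omega
    have h2 : b.testBit k = false :=
      Nat.testBit_lt_two_pow (lt_of_lt_of_le h (Nat.pow_le_pow_right (by norm_num) (by omega)))
    rw [h1, h2, Bool.true_and, Bool.or_false]

theorem pvBor_eq_add (r b : Int) (p : Nat) (hr0 : 0 ≤ r) (hr : r < 2 ^ p)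
    (hb : b = 0 ∨ b = 1) : PySem.Int.bor r (b <<< p) = r + b * 2 ^ p := by
  have hcast : ((2 ^ p : Nat) : Int) = 2 ^ p := by push_cast; ring
  rcases hb with hb | hb <;> subst hb
  · simp [PySem.Int.bor_zero]
  · have h1 : ((1 : Int) <<< p) = ((2 ^ p : Nat) : Int) := by
      rw [Int.shiftLeft_eq, hcast, one_mul]
    have hr' : r = ((r.toNat : Nat) : Int) := by omega
    rw [h1, hr', PySem.Int.bor_natCast, Nat.lor_comm,
        show (2 ^ p : Nat) = 1 * 2 ^ p by ring,
        pvLorAdd 1 r.toNat p (by omega)]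
    push_cast
    ring

theorem pvKept_all01 (n : Int) (rs : List Int) (k : Nat) :
    ∀ b ∈ pvKept n rs k, b = 0 ∨ b = 1 := by
  intro b hb
  unfold pvKept at hb
  obtain ⟨i, _, rfl⟩ := List.mem_map.mp hb
  exact pvBitAt_mem n i

theorem pvKept_succ (n : Int) (rs : List Int) (k : Nat) :
    pvKept n rs (k + 1) =
      if (k : Int) ∉ PySem.Set.ofList rs then pvKept n rs k ++ [pvBitAt n k]
      else pvKept n rs k := by
  unfold pvKept
  rw [List.range_succ, List.filter_append, List.map_append]
  by_cases h : (k : Int) ∈ rs <;> simp [PySem.Set.mem_ofList, h]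

theorem pvLoopA (n : Int) (rs : List Int) (k : Nat) :
    (PySem.List.pyRange 0 (k : Int) 1).foldl (pvStepA n rs) ((0 : Int), (0 : Nat)) =
      (pvHorner (pvKept n rs k), (pvKept n rs k).length) := by
  induction k with
  | zero =>
    rw [show ((0 : Nat) : Int) = 0 from rfl, PySem.List.pyRange_one_eq_nil le_rfl]
    simp [pvKept, pvHorner]
  | succ k ih =>
    have hcast : ((k + 1 : Nat) : Int) = (k : Int) + 1 := by push_cast; ring
    rw [hcast, PySem.List.pyRange_one_succ_right (by positivity), List.foldl_append, ih]
    simp only [List.foldl_cons, List.foldl_nil]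
    rw [pvKept_succ]
    by_cases h : (k : Int) ∈ PySem.Set.ofList rs
    · simp [pvStepA, h]
    · simp only [pvStepA, h, not_false_eq_true, if_pos]
      have hbit : PySem.Int.band (n >>> ((k : Int)).toNat) 1 = pvBitAt n k := by
        rw [PySem.Int.band_one, Int.toNat_natCast, pvShiftRight_floordiv]
        rfl
      have hbounds := pvHorner_bounds (pvKept n rs k) (pvKept_all01 n rs k)
      rw [hbit, pvBor_eq_add _ _ _ hbounds.1 hbounds.2 (pvBitAt_mem n k),
          pvHorner_append]
      simp

-- Python's n & ((1 << L) - 1) is n mod 2^L (also for negative n)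
theorem pvBandMask (n : Int) (L : Nat) :
    PySem.Int.band n (((1 <<< L : Nat) : Int) - 1) = n % 2 ^ L := by
  have hcast : ((2 ^ L : Nat) : Int) = 2 ^ L := by push_cast; ring
  have hmask : (((1 <<< L : Nat) : Int) - 1) = ((2 ^ L - 1 : Nat) : Int) := by
    rw [Nat.shiftLeft_eq, one_mul, Nat.cast_sub Nat.one_le_two_pow, Nat.cast_one]
  have hP : (0 : Int) < 2 ^ L := by positivity
  by_cases hn : 0 ≤ n
  · rw [hmask, PySem.Int.band_of_nonneg hn (Int.natCast_nonneg _), Int.toNat_natCast,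
        Nat.and_two_pow_sub_one_eq_mod]
    rw [Int.natCast_mod, Int.toNat_of_nonneg hn, hcast]
  · have hn' : n < 0 := by omega
    rw [hmask]
    simp only [PySem.Int.band]
    rw [if_neg (by omega), if_pos (Int.natCast_nonneg _)]
    rw [Int.toNat_natCast]
    have hc : ((-n - 1).toNat : Int) = -n - 1 := Int.toNat_of_nonneg (by omega)
    rw [Nat.land_comm, Nat.and_two_pow_sub_one_eq_mod]
    have hle : (-n - 1).toNat % 2 ^ L ≤ 2 ^ L - 1 := by
      have := Nat.mod_lt (-n - 1).toNat (y := 2 ^ L) (Nat.pow_pos (by norm_num))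
      omega
    rw [Nat.cast_sub hle, Nat.cast_sub Nat.one_le_two_pow, hcast, Nat.cast_one,
        Int.natCast_mod, hc, hcast]
    -- goal: 2^L - 1 - (-n - 1) % 2^L = n % 2^L
    set P : Int := 2 ^ L with hPdef
    set r : Int := (-n - 1) % P with hrdef
    have hr0 : 0 ≤ r := Int.emod_nonneg _ (by omega)
    have hr1 : r < P := Int.emod_lt_of_pos _ hP
    have hq : P * ((-n - 1) / P) + r = -n - 1 := Int.mul_ediv_add_emod _ _
    have hn2 : n = (P - 1 - r) + P * (-((-n - 1) / P) - 1) := by linear_combination hq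
    have key : (P - 1 - r) % P = n % P := by
      conv_rhs => rw [hn2]
      rw [Int.add_mul_emod_self_left]
    rw [← key, Int.emod_eq_of_lt (by omega) (by omega)]

-- the splice expression of B's loop body is pvDel, for 0 ≤ m and 0 ≤ j
theorem pvDelBit_eq (m j : Int) (hm : 0 ≤ m) (hj : 0 ≤ j) :
    pvDelBit m j = pvDel j.toNat m := by
  set jn : Nat := j.toNat with hjn
  have h1 : (j + 1).toNat = jn + 1 := by omega
  have hq0 : 0 ≤ m / 2 ^ (jn + 1) := Int.ediv_nonneg hm (by positivity)
  have hr0 : 0 ≤ m % 2 ^ jn := Int.emod_nonneg m (by positivity)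
  have hr1 : m % 2 ^ jn < 2 ^ jn := Int.emod_lt_of_pos m (by positivity)
  unfold pvDelBit
  rw [h1, pvBandMask, Int.shiftRight_eq_div_pow, Int.shiftLeft_eq]
  have hcast : ((2 ^ (jn + 1) : Nat) : Int) = 2 ^ (jn + 1) := by push_cast; ring
  rw [hcast]
  set q : Int := m / 2 ^ (jn + 1) with hqdef
  set r : Int := m % 2 ^ jn with hrdef
  have hqq : q * 2 ^ jn = (((q.toNat * 2 ^ jn : Nat)) : Int) := by
    push_cast
    rw [Int.toNat_of_nonneg hq0]
  have hrr : r = ((r.toNat : Nat) : Int) := by omega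
  rw [hqq, hrr, PySem.Int.bor_natCast, pvLorAdd q.toNat r.toNat jn (by omega)]
  push_cast
  rw [Int.toNat_of_nonneg hq0, Int.toNat_of_nonneg hr0]
  rfl

theorem pvDigits_length (m : Int) (k : Nat) : (pvDigits m k).length = k := by
  induction k generalizing m with
  | zero => rfl
  | succ k ih => simp [pvDigits, ih]

theorem pvHorner_digits (m : Int) (k : Nat) (hm : 0 ≤ m) (hk : m < 2 ^ k) :
    pvHorner (pvDigits m k) = m := by
  induction k generalizing m with
  | zero => simp at hk; simp [pvDigits, pvHorner]; omega
  | succ k ih =>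
    have h2 : (2 : Int) ^ (k + 1) = 2 ^ k * 2 := pow_succ 2 k
    have := ih (m / 2) (by positivity) (by omega)
    simp only [pvDigits, pvHorner, List.foldr] at *
    omega

theorem pvDigits_eq_map (m : Int) (k : Nat) :
    pvDigits m k = (List.range k).map (fun i => m / 2 ^ i % 2) := by
  induction k generalizing m with
  | zero => rfl
  | succ k ih =>
    rw [List.range_succ_eq_map, List.map_cons, List.map_map]
    show (m % 2) :: pvDigits (m / 2) k = (m / 2 ^ 0 % 2) :: _
    congr 1
    · simp
    · rw [ih (m / 2)]
      apply List.map_congr_left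
      intro i _
      show m / 2 / 2 ^ i % 2 = m / 2 ^ (i + 1) % 2
      rw [Int.ediv_ediv_of_nonneg (show (0 : Int) ≤ 2 by norm_num), ← pow_succ']

-- (m % 2^L) / 2^i % 2 = m / 2^i % 2 for i < L
theorem pvM2 (m : Int) (L i : Nat) (h : i < L) :
    (m % 2 ^ L) / 2 ^ i % 2 = m / 2 ^ i % 2 := by
  have hq : m % 2 ^ L = m + (-(m / 2 ^ L) * 2 ^ (L - i)) * 2 ^ i := by
    rw [Int.emod_def, show (2 : Int) ^ L = 2 ^ (L - i) * 2 ^ i by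
      rw [← pow_add]; congr 1; omega]
    ring
  rw [hq, Int.add_mul_ediv_right _ _ (by positivity : ((2 : Int) ^ i) ≠ 0)]
  have h2 : -(m / 2 ^ L) * 2 ^ (L - i) = (-(m / 2 ^ L) * 2 ^ (L - i - 1)) * 2 := by
    rw [mul_assoc, ← pow_succ]
    congr 2
    omega
  rw [h2, mul_comm _ (2 : Int), Int.add_mul_emod_self_left]

-- (m % 2^(j+1)) / 2 = (m / 2) % 2^j
theorem pvM1 (m : Int) (j : Nat) : m % 2 ^ (j + 1) / 2 = m / 2 % 2 ^ j := by
  set q : Int := m / 2 ^ (j + 1) with hqdef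
  set r : Int := m % 2 ^ (j + 1) with hrdef
  have hr0 : 0 ≤ r := Int.emod_nonneg m (by positivity)
  have hr1 : r < 2 ^ (j + 1) := Int.emod_lt_of_pos m (by positivity)
  have hid : 2 ^ (j + 1) * q + r = m := Int.mul_ediv_add_emod m (2 ^ (j + 1))
  have hm2 : m / 2 = r / 2 + q * 2 ^ j := by
    have e : m = r + (q * 2 ^ j) * 2 := by rw [← hid, pow_succ]; ring
    rw [e, Int.add_mul_ediv_right _ _ (by norm_num)]
  rw [hm2, mul_comm q, Int.add_mul_emod_self_left, Int.emod_eq_of_lt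
    (Int.ediv_nonneg hr0 (by norm_num))
    ((Int.ediv_lt_iff_lt_mul (by norm_num)).mpr (by rw [← pow_succ]; exact hr1))]

theorem pvDel_zero (m : Int) : pvDel 0 m = m / 2 := by
  simp [pvDel]

theorem pvDel_succ_split (m : Int) (j : Nat) :
    pvDel (j + 1) m = m % 2 ^ (j + 1) + (m / 2 ^ (j + 2) * 2 ^ j) * 2 := by
  unfold pvDel
  rw [pow_succ 2 j]
  ring

theorem pvDel_succ_mod_two (m : Int) (j : Nat) : pvDel (j + 1) m % 2 = m % 2 := by
  rw [pvDel_succ_split, mul_comm _ (2 : Int), Int.add_mul_emod_self_left,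
      Int.emod_emod_of_dvd m (dvd_pow_self 2 (Nat.succ_ne_zero j))]

theorem pvDel_succ_div_two (m : Int) (j : Nat) : pvDel (j + 1) m / 2 = pvDel j (m / 2) := by
  rw [pvDel_succ_split, Int.add_mul_ediv_right _ _ (by norm_num : (2 : Int) ≠ 0), pvM1]
  have e : m / 2 ^ (j + 2) = m / 2 / 2 ^ (j + 1) := by
    rw [Int.ediv_ediv_of_nonneg (show (0 : Int) ≤ 2 by norm_num),
        show (2 : Int) * 2 ^ (j + 1) = 2 ^ (j + 2) by rw [← pow_succ']]
  rw [e]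
  unfold pvDel
  ring

-- digits of pvDel j m = digits of m with position j erased
theorem pvDigits_del (j : Nat) : ∀ (k : Nat) (m : Int), j ≤ k →
    pvDigits (pvDel j m) k = (pvDigits m (k + 1)).eraseIdx j := by
  induction j with
  | zero => intro k m _; rw [pvDel_zero]; rfl
  | succ j ih =>
    intro k m hjk
    obtain ⟨k', rfl⟩ : ∃ k', k = k' + 1 := ⟨k - 1, by omega⟩
    show (pvDel (j + 1) m % 2) :: pvDigits (pvDel (j + 1) m / 2) k' = _
    rw [pvDel_succ_mod_two, pvDel_succ_div_two, ih k' (m / 2) (by omega)]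
    rfl

-- bounds for the splice step
theorem pvDel_nonneg (j : Nat) (m : Int) (hm : 0 ≤ m) : 0 ≤ pvDel j m := by
  have h1 : 0 ≤ m / 2 ^ (j + 1) := Int.ediv_nonneg hm (by positivity)
  have h2 : 0 ≤ m % 2 ^ j := Int.emod_nonneg m (by positivity)
  have h3 : (0 : Int) ≤ (m / 2 ^ (j + 1)) * 2 ^ j := by positivity
  unfold pvDel; omega

theorem pvDel_lt (j k : Nat) (m : Int) (hjk : j ≤ k) (hm : m < 2 ^ (k + 1)) :
    pvDel j m < 2 ^ k := by
  have hpow : (2 : Int) ^ (k - j) * 2 ^ j = 2 ^ k := by rw [← pow_add]; congr 1; omega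
  have hq : m / 2 ^ (j + 1) < 2 ^ (k - j) := by
    rw [Int.ediv_lt_iff_lt_mul (by positivity)]
    calc m < 2 ^ (k + 1) := hm
      _ = 2 ^ (k - j) * 2 ^ (j + 1) := by rw [← pow_add]; congr 1; omega
  have hr : m % 2 ^ j < 2 ^ j := Int.emod_lt_of_pos m (by positivity)
  have hmul : m / 2 ^ (j + 1) * 2 ^ j ≤ (2 ^ (k - j) - 1) * 2 ^ j :=
    mul_le_mul_of_nonneg_right (by omega) (by positivity)
  have hE : ((2 : Int) ^ (k - j) - 1) * 2 ^ j = 2 ^ k - 2 ^ j := by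
    rw [sub_mul, hpow]; ring
  unfold pvDel
  have h2j : (0 : Int) < 2 ^ j := by positivity
  linarith

-- keeping with all listed positions below the window keeps everything
theorem pvKeep_of_lt (l : List Int) : ∀ (i : Int) (js : List Int),
    (∀ r ∈ js, r < i) → pvKeep i l js = l := by
  induction l with
  | nil => intro i js _; rfl
  | cons b t ih =>
    intro i js h
    have hni : i ∉ js := fun hmem => absurd (h i hmem) (lt_irrefl i)
    show (if i ∈ js then _ else _) = _
    rw [if_neg hni, ih (i + 1) js (fun r hr => lt_trans (h r hr) (by omega))]

-- erasing the (strictly largest remaining) position j commutes with pvKeep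
theorem pvKeep_eraseIdx (j : Nat) : ∀ (l : List Int) (i : Int) (js : List Int),
    j < l.length → (∀ r ∈ js, r < i + j) →
    pvKeep i (l.eraseIdx j) js = pvKeep i l ((i + (j : Int)) :: js) := by
  induction j with
  | zero =>
    intro l i js hlen h
    obtain ⟨b, t, rfl⟩ : ∃ b t, l = b :: t := by
      cases l with
      | nil => simp at hlen
      | cons b t => exact ⟨b, t, rfl⟩
    simp only [List.eraseIdx_cons_zero, pvKeep, Nat.cast_zero, add_zero]
    rw [if_pos (List.mem_cons_self), pvKeep_of_lt t i js (by simpa using h),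
        pvKeep_of_lt t (i + 1) (i :: js)]
    intro r hr
    rcases List.mem_cons.mp hr with h' | h'
    · omega
    · have := h r h'; simp at this; omega
  | succ j ih =>
    intro l i js hlen h
    obtain ⟨b, t, rfl⟩ : ∃ b t, l = b :: t := by
      cases l with
      | nil => simp at hlen
      | cons b t => exact ⟨b, t, rfl⟩
    rw [show (i + ((j + 1 : Nat) : Int)) = i + ((j : Int) + 1) from by push_cast; ring]
    have hmm : (i ∈ (i + ((j : Int) + 1)) :: js) ↔ i ∈ js := by
      simp only [List.mem_cons]
      constructor
      · rintro (h' | h')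
        · omega
        · exact h'
      · exact Or.inr
    have hrec : pvKeep (i + 1) (t.eraseIdx j) js = pvKeep (i + 1) t ((i + 1 + (j : Int)) :: js) := by
      apply ih t (i + 1) js (by simpa using hlen)
      intro r hr
      have := h r hr
      push_cast at *
      omega
    have harr : i + 1 + (j : Int) = i + ((j : Int) + 1) := by ring
    show pvKeep i (b :: t.eraseIdx j) js = pvKeep i (b :: t) _
    show (if i ∈ js then _ else _) = (if i ∈ (i + ((j : Int) + 1)) :: js then _ else _)
    rw [if_congr hmm rfl rfl]
    by_cases hc : i ∈ js
    · rw [if_pos hc, if_pos hc, hrec, harr]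
    · rw [if_neg hc, if_neg hc, hrec, harr]

-- B's fold = Horner value of the kept digits
theorem pvLoopB (js : List Int) : ∀ (k : Nat) (m : Int), 0 ≤ m → m < 2 ^ k →
    js.Pairwise (fun a b => b < a) → (∀ j ∈ js, 0 ≤ j ∧ j < (k : Int)) →
    js.foldl pvDelBit m = pvHorner (pvKeep 0 (pvDigits m k) js) := by
  induction js with
  | nil =>
    intro k m hm hk _ _
    rw [List.foldl_nil, pvKeep_of_lt _ _ _ (by simp), pvHorner_digits m k hm hk]
  | cons j rest ih =>
    intro k m hm hk hpair hbnd
    obtain ⟨hj0, hjk⟩ := hbnd j List.mem_cons_self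
    obtain ⟨k', rfl⟩ : ∃ k', k = k' + 1 := ⟨k - 1, by omega⟩
    have hjn : j.toNat ≤ k' := by omega
    rw [List.foldl_cons, pvDelBit_eq m j hm hj0]
    rw [ih k' (pvDel j.toNat m) (pvDel_nonneg _ _ hm) (pvDel_lt _ _ _ hjn hk)
      (List.Pairwise.of_cons hpair)
      (fun r hr => ⟨(hbnd r (List.mem_cons_of_mem j hr)).1, by
        have := (List.pairwise_cons.mp hpair).1 r hr; omega⟩)]
    rw [pvDigits_del j.toNat k' m hjn,
        pvKeep_eraseIdx j.toNat (pvDigits m (k' + 1)) 0 rest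
          (by rw [pvDigits_length]; omega)
          (fun r hr => by have := (List.pairwise_cons.mp hpair).1 r hr; omega)]
    rw [show (0 : Int) + (j.toNat : Int) = j by omega]

-- pvKeep over an indexed window is filter-map over the same window
theorem pvKeep_range' (k : Nat) : ∀ (a : Nat) (f : Nat → Int) (js : List Int),
    pvKeep (a : Int) ((List.range' a k).map f) js =
      ((List.range' a k).filter (fun (p : Nat) => !decide ((p : Int) ∈ js))).map f := by
  induction k with
  | zero => intro a f js; rfl
  | succ k ih =>
    intro a f js
    rw [List.range'_succ]
    simp only [List.map_cons, List.filter_cons]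
    by_cases h : (a : Int) ∈ js
    · simp only [pvKeep, if_pos h]
      rw [show ((a : Int) + 1) = ((a + 1 : Nat) : Int) by push_cast; ring, ih]
      simp [h]
    · simp only [pvKeep, if_neg h]
      rw [show ((a : Int) + 1) = ((a + 1 : Nat) : Int) by push_cast; ring, ih]
      simp [h]

-- ===== VERDICT (by name: the statement is the Claim_ definition above) =====
theorem remove_bits_from_int_spec : Claim_equal_remove_bits_from_int := by
  intro n rs _
  unfold Spec_remove_bits_from_int remove_bits_from_int remove_bits_from_int_alt
  set L : Nat := PySem.Int.bitLength n with hL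
  set m0 : Int := PySem.Int.band n ((1 <<< L) - 1) with hm0
  set js : List Int := PySem.List.sorted
    (PySem.Set.ofList (rs.filter (fun i => decide (0 ≤ i ∧ i < (L : Int)))))
    (fun x => x) true with hjs
  have hm0' : m0 = n % 2 ^ L := pvBandMask n L
  have hmem : ∀ x : Int, x ∈ js ↔ (x ∈ rs ∧ 0 ≤ x ∧ x < (L : Int)) := by
    intro x
    rw [hjs, PySem.List.mem_sorted, PySem.Set.mem_ofList, List.mem_filter]
    simp
  have hnd : js.Nodup :=
    (PySem.List.sorted_perm _ _ _).nodup_iff.mpr (PySem.Set.nodup_ofList _)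
  have hdesc : js.Pairwise (fun a b => b < a) := by
    have hge : js.Pairwise (fun a b => b ≤ a) :=
      PySem.List.sorted_pairwise_rev _ (fun x => x)
    exact (hge.and hnd).imp (fun h => lt_of_le_of_ne h.1 (Ne.symm h.2))
  rw [pvLoopA n rs L,
      pvLoopB js L m0 (by rw [hm0']; exact Int.emod_nonneg n (by positivity))
        (by rw [hm0']; exact Int.emod_lt_of_pos n (by positivity)) hdesc
        (fun j hj => ⟨((hmem j).mp hj).2.1, ((hmem j).mp hj).2.2⟩)]
  have hdig : pvDigits m0 L = (List.range' 0 L).map (fun i => m0 / 2 ^ i % 2) := by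
    rw [pvDigits_eq_map, List.range_eq_range']
  show pvHorner (pvKept n rs L) = pvHorner (pvKeep 0 (pvDigits m0 L) js)
  have hfc : List.filter (fun (i : Nat) => !(decide ((i : Int) ∈ PySem.Set.ofList rs))) (List.range' 0 L)
      = List.filter (fun (p : Nat) => !decide ((p : Int) ∈ js)) (List.range' 0 L) := by
    apply List.filter_congr
    intro i hi
    have hiL : i < L := by have := List.mem_range'_1.mp hi; omega
    have hiff : ((i : Int) ∈ PySem.Set.ofList rs) ↔ ((i : Int) ∈ js) := by
      rw [hmem, PySem.Set.mem_ofList]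
      constructor
      · exact fun h => ⟨h, by positivity, by exact_mod_cast hiL⟩
      · exact fun h => h.1
    rw [decide_eq_decide.mpr hiff]
  have hmap : ∀ i ∈ List.filter (fun (p : Nat) => !decide ((p : Int) ∈ js)) (List.range' 0 L),
      pvBitAt n i = m0 / 2 ^ i % 2 := by
    intro i hi
    have hiL : i < L := by have := List.mem_range'_1.mp (List.mem_of_mem_filter hi); omega
    unfold pvBitAt
    rw [PySem.Int.floordiv_eq_ediv_of_pos (by positivity),
        PySem.Int.mod_eq_emod_of_pos (by norm_num), hm0', pvM2 n L i hiL]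
  unfold pvKept
  rw [List.range_eq_range', hfc, List.map_congr_left hmap, ← pvKeep_range', ← hdig]
  simp
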